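-- pv_equiv track=rewrite | github.com/ngocnd2402/Document_Simi | Solution/Ngram/Ngram.py | document_representation
-- ===== SOURCE A (Python) =====
-- def document_representation(ngrams, vocabulary):
--     document_vector = {}
--     for ngram in vocabulary:
--         if ngram in ngrams:
--             if ngram in document_vector:
--                 document_vector[ngram] += 1
--             else:
--                 document_vector[ngram] = 1
--
--     return document_vector
-- ===== SOURCE B (Python) =====
-- def document_representation(ngrams, vocabulary):
--     # Enumerate the distinct vocabulary items (first-occurrence order) and, for
--     # each one that occurs in ngrams, recount its occurrences with list.count:
--     # no incremental counting dict is ever built.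
--     return {item: vocabulary.count(item)
--             for item in dict.fromkeys(vocabulary)
--             if item in ngrams}
-- ===== Notes on version B (the rewrite author's own statement) =====
-- stated objective: alternative
-- what changed: A builds the counts incrementally in one guarded pass over vocabulary (dict lookup + increment per element); B never increments: it enumerates the distinct vocabulary items via dict.fromkeys and recomputes each kept key's multiplicity from scratch with vocabulary.count in a comprehension.
import Mathlib
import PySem

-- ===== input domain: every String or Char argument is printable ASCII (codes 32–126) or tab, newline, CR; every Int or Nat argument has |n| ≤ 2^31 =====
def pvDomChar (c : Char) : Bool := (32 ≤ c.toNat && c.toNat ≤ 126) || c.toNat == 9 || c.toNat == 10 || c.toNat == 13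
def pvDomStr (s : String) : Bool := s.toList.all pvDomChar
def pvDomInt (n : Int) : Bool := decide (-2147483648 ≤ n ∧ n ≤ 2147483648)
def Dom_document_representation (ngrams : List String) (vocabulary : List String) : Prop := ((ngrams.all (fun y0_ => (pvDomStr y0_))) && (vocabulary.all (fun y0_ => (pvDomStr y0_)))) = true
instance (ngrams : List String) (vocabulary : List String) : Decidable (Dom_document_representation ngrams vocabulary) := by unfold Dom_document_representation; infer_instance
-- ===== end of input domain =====

-- B replaces A's incremental guarded counting dict with a distinct-keys-then-recount
-- comprehension (dict.fromkeys + vocabulary.count): same return value, alternative algorithm.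


-- ===== PORT A =====
def document_representation (ngrams : List String) (vocabulary : List String) : List (String × Int) :=
  (vocabulary.foldl (fun d ngram =>
      if ngrams.contains ngram then
        if d.contains ngram then
          d.insert ngram (d.getD ngram 0 + 1)
        else
          d.insert ngram 1
      else d) (PySem.Dict.empty : PySem.Dict String Int)).items

-- ===== PORT B =====
def document_representation_alt (ngrams : List String) (vocabulary : List String) : List (String × Int) :=
  ((PySem.List.dedup vocabulary).filter (fun item => ngrams.contains item)).map
    (fun item => (item, (vocabulary.count item : Int)))

-- ===== PRECONDITION & SPEC =====
def Spec_document_representation (ngrams : List String) (vocabulary : List String) (out : List (String × Int)) : Prop := out = document_representation_alt ngrams vocabulary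
instance (ngrams : List String) (vocabulary : List String) (out : List (String × Int)) : Decidable (Spec_document_representation ngrams vocabulary out) := by unfold Spec_document_representation; infer_instance

-- ===== CLAIM (what is proved, stated in full; the proofs are below) =====
def Claim_equal_document_representation : Prop := ∀ (ngrams : List String) (vocabulary : List String), Dom_document_representation ngrams vocabulary → Spec_document_representation ngrams vocabulary (document_representation ngrams vocabulary)

-- ===== LEMMAS AND PROOFS =====

-- A's guarded loop body is 'insert x (getD x 0 + 1)' on the filtered list.
lemma foldA_eq_counter_fold (p : String → Bool) (l : List String)
    (d : PySem.Dict String Int) :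
    l.foldl (fun d x =>
        if p x then
          if d.contains x then d.insert x (d.getD x 0 + 1) else d.insert x 1
        else d) d
      = (l.filter p).foldl (fun d x => d.insert x (d.getD x 0 + 1)) d := by
  induction l generalizing d with
  | nil => rfl
  | cons x xs ih =>
    by_cases hp : p x
    · by_cases hc : (d.contains x : Bool)
      · simp [hp, hc, ih]
      · have h0 : d.getD x 0 = 0 :=
          PySem.Dict.getD_of_not_contains d 0 (by simpa using hc)
        simp [hp, hc, ih, h0]
    · simp [hp, ih]

-- set-of-filter = filter-of-set (first-occurrence order preserved)
lemma ofList_filter (p : String → Bool) (l : List String) :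
    PySem.Set.ofList (l.filter p) = (PySem.Set.ofList l).filter p := by
  induction l using List.reverseRecOn with
  | nil => rfl
  | append_singleton xs x ih =>
    rw [List.filter_append, List.filter_singleton, PySem.Set.ofList_append_singleton,
        PySem.Set.add_eq_ite]
    by_cases hp : p x
    · simp only [hp, cond_true]
      rw [PySem.Set.ofList_append_singleton, PySem.Set.add_eq_ite, ih]
      by_cases hm : x ∈ xs
      · have hmem : x ∈ (PySem.Set.ofList xs).filter p :=
          List.mem_filter.mpr ⟨(PySem.Set.mem_ofList xs x).mpr hm, hp⟩
        simp [hmem, hm]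
      · have hnm : x ∉ PySem.Set.ofList xs := fun h => hm ((PySem.Set.mem_ofList xs x).mp h)
        have hnm2 : x ∉ (PySem.Set.ofList xs).filter p := fun h => hnm (List.mem_filter.mp h).1
        simp [hnm, hnm2, List.filter_append, hp]
    · simp only [hp, cond_false, List.append_nil, ih]
      by_cases hm : x ∈ xs
      · simp [hm]
      · simp [hm, List.filter_append, hp]

-- counting a satisfying element ignores the filter
lemma count_filter_of_pos (p : String → Bool) (l : List String) (x : String)
    (hx : p x = true) : (l.filter p).count x = l.count x := by
  induction l with
  | nil => rfl
  | cons y ys ih =>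
    by_cases hy : p y
    · simp [hy, List.count_cons, ih]
    · have hne : y ≠ x := fun h => hy (h ▸ hx)
      simp [hy, hne, ih]

-- ===== VERDICT (by name: the statement is the Claim_ definition above) =====
theorem document_representation_spec : Claim_equal_document_representation := by
  intro ngrams vocabulary _
  unfold Spec_document_representation document_representation document_representation_alt
  rw [foldA_eq_counter_fold]
  rw [PySem.Dict.foldl_insert_getD_add_one_eq_counter, PySem.Dict.items_counter]
  rw [ofList_filter]
  simp only [PySem.List.dedup_eq_ofList]
  apply List.map_congr_left
  intro k hk
  have hpk : ngrams.contains k = true := (List.mem_filter.mp hk).2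
  rw [count_filter_of_pos _ _ _ hpk]
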